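-- pv_equiv track=rewrite | github.com/khloe1425/luyenthihsgioi | THCS/2022_2023/NgheAn_2223/Cau4/MatDo.py | max_high_density_length
-- ===== SOURCE A (Python) =====
-- def max_high_density_length(s):
--     n = len(s)
--     max_length = 0
--
--     # Duyệt từng vị trí trong chuỗi
--     for i in range(n):
--         count = {}  # Đếm số lần xuất hiện của các ký tự
--         for j in range(i, n):
--             char = s[j]
--             if char in count:
--                 count[char] += 1
--             else:
--                 count[char] = 1
--
--             # Kiểm tra điều kiện mật độ xuất hiện cao
--             max_count = max(count.values())
--             total_count = j - i + 1
--             other_count = total_count - max_count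
--
--             if max_count > other_count:
--                 max_length = max(max_length, total_count)
--
--     return max_length
-- ===== SOURCE B (Python) =====
-- def max_high_density_length(s):
--     n = len(s)
--     best = 0
--     # A substring qualifies iff some character c occurs in it more often than
--     # all other characters together, i.e. its +1/-1 balance w.r.t. c is positive.
--     for c in set(s):
--         for i in range(n):
--             bal = 0
--             for j in range(i, n):
--                 bal += 1 if s[j] == c else -1
--                 if bal > 0:
--                     best = max(best, j - i + 1)
--     return best
-- ===== Notes on version B (the rewrite author's own statement) =====
-- stated objective: alternative
-- what changed: Instead of maintaining a per-start frequency dict and recomputing max(count.values()) at every step, B iterates over each distinct character c and keeps a single +1/-1 balance per start, recording lengths where the balance is positive (some c strictly outnumbers all others).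
import Mathlib
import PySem

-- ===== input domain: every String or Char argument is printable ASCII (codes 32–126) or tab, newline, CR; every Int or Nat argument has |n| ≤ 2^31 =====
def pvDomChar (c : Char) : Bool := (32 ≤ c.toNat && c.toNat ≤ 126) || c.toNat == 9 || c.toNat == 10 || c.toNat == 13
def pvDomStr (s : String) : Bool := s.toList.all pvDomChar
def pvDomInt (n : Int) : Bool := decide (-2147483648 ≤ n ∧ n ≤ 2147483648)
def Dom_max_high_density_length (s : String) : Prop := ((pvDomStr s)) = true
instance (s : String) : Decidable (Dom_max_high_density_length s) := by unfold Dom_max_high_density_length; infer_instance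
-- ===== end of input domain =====

-- B replaces A's per-start frequency dict with a per-distinct-character +1/-1 balance
-- (alternative decomposition, same cost); proved to return the same value on every input.

-- ===== PORT A =====
-- Literal port of A: for each start i, a frequency dict over s[i..j], recomputing
-- max(count.values()) at every step.  max() is taken with default 0, which is never
-- used: the dict is non-empty at every point where Python calls max().
def max_high_density_length (s : String) : Int :=
  let t := s.toList
  let n : Int := PySem.List.len t
  (PySem.List.pyRange 0 n 1).foldl (fun max_length i =>
    ((PySem.List.pyRange i n 1).foldl (fun (st : PySem.Dict Char Int × Int) j =>
      let count := st.1
      let char := PySem.List.pyGetD t j ' '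
      let count := if count.contains char then count.insert char (count.getD char 0 + 1)
                   else count.insert char 1
      let max_count := (PySem.List.max? count.values id).getD 0
      let total_count := j - i + 1
      let other_count := total_count - max_count
      if max_count > other_count then (count, max st.2 total_count) else (count, st.2))
      (PySem.Dict.empty, max_length)).2) 0

-- ===== PORT B =====
-- Port of B: for each distinct character c, a single +1/-1 balance per start;
-- a positive balance means c strictly outnumbers all other characters together.
def max_high_density_length_alt (s : String) : Int :=
  let t := s.toList
  let n : Int := PySem.List.len t
  (PySem.Set.ofList t).foldl (fun best c =>
    (PySem.List.pyRange 0 n 1).foldl (fun best i =>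
      ((PySem.List.pyRange i n 1).foldl (fun (st : Int × Int) j =>
        let bal := st.1 + (if PySem.List.pyGetD t j ' ' == c then 1 else -1)
        (bal, if bal > 0 then max st.2 (j - i + 1) else st.2)) (0, best)).2) best) 0

-- ===== PRECONDITION & SPEC =====
def Spec_max_high_density_length (s : String) (out : Int) : Prop := out = max_high_density_length_alt s
instance (s : String) (out : Int) : Decidable (Spec_max_high_density_length s out) := by unfold Spec_max_high_density_length; infer_instance

-- ===== CLAIM (what is proved, stated in full; the proofs are below) =====
def Claim_equal_max_high_density_length : Prop := ∀ (s : String), Dom_max_high_density_length s → Spec_max_high_density_length s (max_high_density_length s)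

-- ===== LEMMAS AND PROOFS =====

-- A substring qualifies iff some character strictly outnumbers all others together.
-- pvSeg t i k = the characters s[i..k-1]; pvGoodc / pvGood are the two conditions;
-- pvScA/pvScB are the scores contributed at (start i, offset d); pvSA/pvSB the full score lists.
def pvSeg (t : List Char) (i k : Nat) : List Char := (t.drop i).take (k - i)
def pvGoodc (c : Char) (l : List Char) : Bool := decide ((l.length : Int) < 2 * (l.count c : Int))
def pvGood (l : List Char) : Bool := l.any (fun c => pvGoodc c l)
def pvScA (t : List Char) (i d : Nat) : Int := if pvGood (pvSeg t i (i + d + 1)) then (d : Int) + 1 else 0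
def pvScB (c : Char) (t : List Char) (i d : Nat) : Int := if pvGoodc c (pvSeg t i (i + d + 1)) then (d : Int) + 1 else 0
def pvRowA (t : List Char) (i k : Nat) : List Int := (List.range (k - i)).map (pvScA t i)
def pvRowB (c : Char) (t : List Char) (i k : Nat) : List Int := (List.range (k - i)).map (pvScB c t i)
def pvSA (t : List Char) : List Int := (List.range t.length).flatMap (fun i => pvRowA t i t.length)
def pvSB (t : List Char) : List Int :=
  (PySem.Set.ofList t).flatMap (fun c => (List.range t.length).flatMap (fun i => pvRowB c t i t.length))

theorem pv_foldl_max_le_iff (l : List Int) (a m : Int) :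
    l.foldl max a ≤ m ↔ a ≤ m ∧ ∀ x ∈ l, x ≤ m := by
  induction l generalizing a with
  | nil => simp
  | cons x l ih => simp [List.foldl_cons, ih, and_assoc]

theorem pv_nonneg_foldl (l : List Int) (a : Int) (h : 0 ≤ a) : 0 ≤ l.foldl max a :=
  le_trans h (PySem.List.le_foldl_max l a).1

theorem pv_foldl_opt_some (g : Option Int → Int → Option Int)
    (hg : ∀ m x, ∃ y, g (some m) x = some y) :
    ∀ (l : List Int) (m : Int), ∃ m', l.foldl g (some m) = some m'
  | [], m => ⟨m, rfl⟩
  | x :: l, m => by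
      rw [List.foldl_cons]
      obtain ⟨y, hy⟩ := hg m x
      rw [hy]
      exact pv_foldl_opt_some g hg l y

theorem pv_max?_isSome (l : List Int) (h : l ≠ []) :
    ∃ m, PySem.List.max? l id = some m := by
  cases l with
  | nil => exact absurd rfl h
  | cons x l =>
      show ∃ m, List.foldl _ (some x) l = some m
      exact pv_foldl_opt_some _ (fun m x => by dsimp only; split <;> exact ⟨_, rfl⟩) l x

theorem pv_values_counter (l : List Char) :
    (PySem.Dict.counter l).values = (PySem.Set.ofList l).map (fun c => (l.count c : Int)) := by
  simp only [PySem.Dict.values, PySem.Dict.items_counter, List.map_map]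
  rfl

-- A's per-step test "max(count.values()) > other_count" is exactly pvGood of the segment.
theorem pv_condA (l : List Char) (h : l ≠ []) :
    ((l.length : Int) - (PySem.List.max? (PySem.Dict.counter l).values id).getD 0
      < (PySem.List.max? (PySem.Dict.counter l).values id).getD 0) ↔ pvGood l = true := by
  have hvne : (PySem.Dict.counter l).values ≠ [] := by
    rw [pv_values_counter]
    have : l.head h ∈ PySem.Set.ofList l := (PySem.Set.mem_ofList l _).2 (List.head_mem h)
    exact List.ne_nil_of_mem (List.mem_map_of_mem this)
  obtain ⟨m, hm⟩ := pv_max?_isSome _ hvne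
  have hmem : m ∈ (PySem.Dict.counter l).values := PySem.List.max?_mem hm
  have hmax : ∀ y ∈ (PySem.Dict.counter l).values, y ≤ m := by
    intro y hy; exact PySem.List.max?_isMax hm y hy
  rw [pv_values_counter] at hmem hmax
  obtain ⟨c0, hc0, hc0m⟩ := List.mem_map.1 hmem
  rw [hm]
  constructor
  · intro hlt
    refine List.any_eq_true.2 ⟨c0, (PySem.Set.mem_ofList l c0).1 hc0, ?_⟩
    simp only [pvGoodc, decide_eq_true_eq, Option.getD_some] at hlt ⊢
    omega
  · intro hg
    obtain ⟨c, hc, hgc⟩ := List.any_eq_true.1 hg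
    simp only [pvGoodc, decide_eq_true_eq] at hgc
    have : (l.count c : Int) ≤ m :=
      hmax _ (List.mem_map_of_mem ((PySem.Set.mem_ofList l c).2 hc))
    simp only [Option.getD_some]
    omega

theorem pvSeg_len (t : List Char) (i k : Nat) (h2 : k ≤ t.length) :
    (pvSeg t i k).length = k - i := by
  simp only [pvSeg, List.length_take, List.length_drop]
  omega

theorem pvSeg_self (t : List Char) (i : Nat) : pvSeg t i i = [] := by
  simp [pvSeg]

theorem pvSeg_succ (t : List Char) (i k : Nat) (h1 : i ≤ k) (h2 : k < t.length) :
    pvSeg t i (k + 1) = pvSeg t i k ++ [t[k]] := by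
  simp only [pvSeg]
  have h3 : k + 1 - i = (k - i) + 1 := by omega
  rw [h3, List.take_add_one]
  have : (t.drop i)[k - i]? = some t[k] := by
    rw [List.getElem?_drop]
    have : i + (k - i) = k := by omega
    rw [this, List.getElem?_eq_getElem h2]
  rw [this]
  rfl

theorem pv_mem_seg {t : List Char} {i k : Nat} {c : Char} (h : c ∈ pvSeg t i k) : c ∈ t :=
  List.mem_of_mem_drop (List.mem_of_mem_take h)

theorem pv_insert_step (d : PySem.Dict Char Int) (x : Char) :
    (if d.contains x then d.insert x (d.getD x 0 + 1) else d.insert x 1)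
      = d.insert x (d.getD x 0 + 1) := by
  cases h : d.contains x with
  | true => simp
  | false => simp [PySem.Dict.getD_of_not_contains d 0 h]

theorem pv_counter_snoc (l : List Char) (x : Char) :
    (PySem.Dict.counter l).insert x ((PySem.Dict.counter l).getD x 0 + 1)
      = PySem.Dict.counter (l ++ [x]) := by
  rw [← PySem.Dict.foldl_insert_getD_add_one_eq_counter l,
      ← PySem.Dict.foldl_insert_getD_add_one_eq_counter (l ++ [x]), List.foldl_append]
  rfl

-- the inner loop of A, characterized: dict = counter of the segment, best = running max of scores
theorem pv_innerA (t : List Char) (i : Nat) (m0 : Int) (h0 : 0 ≤ m0)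
    (k : Nat) (h1 : i ≤ k) (h2 : k ≤ t.length) :
    (PySem.List.pyRange (i : Int) (k : Int) 1).foldl
      (fun (st : PySem.Dict Char Int × Int) j =>
        let count := st.1
        let char := PySem.List.pyGetD t j ' '
        let count := if count.contains char then count.insert char (count.getD char 0 + 1)
                     else count.insert char 1
        let max_count := (PySem.List.max? count.values id).getD 0
        let total_count := j - (i : Int) + 1
        let other_count := total_count - max_count
        if max_count > other_count then (count, max st.2 total_count) else (count, st.2))
      (PySem.Dict.empty, m0)
    = (PySem.Dict.counter (pvSeg t i k), (pvRowA t i k).foldl max m0) := by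
  induction k, h1 using Nat.le_induction with
  | base =>
      rw [PySem.List.pyRange_one_eq_nil (le_refl _)]
      simp [pvSeg_self, pvRowA, PySem.Dict.counter]
  | succ k hik ih =>
      have hk : k < t.length := by omega
      have hcast : ((k + 1 : Nat) : Int) = (k : Int) + 1 := by push_cast; ring
      rw [hcast, PySem.List.pyRange_one_succ_right (by exact_mod_cast hik), List.foldl_append,
        ih (by omega)]
      simp only [List.foldl_cons, List.foldl_nil]
      rw [show PySem.List.pyGetD t (k : Int) ' ' = t[k] by
        simp [PySem.List.pyGetD_natCast, List.getD_eq_getElem?_getD, List.getElem?_eq_getElem hk]]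
      rw [pv_insert_step, pv_counter_snoc, ← pvSeg_succ t i k hik hk]
      have hne : pvSeg t i (k + 1) ≠ [] := by
        have := pvSeg_len t i (k + 1) (by omega)
        intro hc; rw [hc] at this; simp at this; omega
      have hlen : ((pvSeg t i (k + 1)).length : Int) = (k : Int) - (i : Int) + 1 := by
        rw [pvSeg_len t i (k + 1) (by omega)]; omega
      have hcond := pv_condA (pvSeg t i (k + 1)) hne
      rw [hlen] at hcond
      have hrow : pvRowA t i (k + 1) = pvRowA t i k ++ [pvScA t i (k - i)] := by
        simp only [pvRowA]
        have : k + 1 - i = (k - i) + 1 := by omega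
        rw [this, List.range_succ, List.map_append, List.map_cons, List.map_nil]
      have hsc : pvScA t i (k - i) = if pvGood (pvSeg t i (k + 1)) then (k : Int) - (i : Int) + 1 else 0 := by
        simp only [pvScA]
        have he : i + (k - i) + 1 = k + 1 := by omega
        rw [he]
        split <;> omega
      rw [hrow, List.foldl_append, List.foldl_cons, List.foldl_nil, hsc]
      by_cases hg : pvGood (pvSeg t i (k + 1)) = true
      · rw [if_pos (hcond.2 hg), if_pos hg]
      · rw [if_neg (fun hc => hg (hcond.1 hc)), if_neg hg]
        rw [max_eq_left (pv_nonneg_foldl _ _ h0)]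

-- the inner loop of B: balance = 2·count − length of the segment, best = running max of scores
theorem pv_innerB (t : List Char) (c : Char) (i : Nat) (m0 : Int) (h0 : 0 ≤ m0)
    (k : Nat) (h1 : i ≤ k) (h2 : k ≤ t.length) :
    (PySem.List.pyRange (i : Int) (k : Int) 1).foldl
      (fun (st : Int × Int) j =>
        let bal := st.1 + (if PySem.List.pyGetD t j ' ' == c then 1 else -1)
        (bal, if bal > 0 then max st.2 (j - (i : Int) + 1) else st.2))
      (0, m0)
    = (2 * ((pvSeg t i k).count c : Int) - ((pvSeg t i k).length : Int),
       (pvRowB c t i k).foldl max m0) := by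
  induction k, h1 using Nat.le_induction with
  | base =>
      rw [PySem.List.pyRange_one_eq_nil (le_refl _)]
      simp [pvSeg_self, pvRowB]
  | succ k hik ih =>
      have hk : k < t.length := by omega
      have hcast : ((k + 1 : Nat) : Int) = (k : Int) + 1 := by push_cast; ring
      rw [hcast, PySem.List.pyRange_one_succ_right (by exact_mod_cast hik), List.foldl_append,
        ih (by omega)]
      simp only [List.foldl_cons, List.foldl_nil]
      rw [show PySem.List.pyGetD t (k : Int) ' ' = t[k] by
        simp [PySem.List.pyGetD_natCast, List.getD_eq_getElem?_getD, List.getElem?_eq_getElem hk]]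
      have hlen1 : (pvSeg t i (k + 1)).length = k + 1 - i := pvSeg_len t i (k + 1) (by omega)
      have hlen0 : (pvSeg t i k).length = k - i := pvSeg_len t i k (by omega)
      have hcnt : (pvSeg t i (k + 1)).count c
          = (pvSeg t i k).count c + (if t[k] == c then 1 else 0) := by
        rw [pvSeg_succ t i k hik hk, List.count_append]
        simp [List.count_cons, List.count_nil]
      have hrow : pvRowB c t i (k + 1) = pvRowB c t i k ++ [pvScB c t i (k - i)] := by
        simp only [pvRowB]
        have : k + 1 - i = (k - i) + 1 := by omega
        rw [this, List.range_succ, List.map_append, List.map_cons, List.map_nil]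
      rw [hrow, List.foldl_append, List.foldl_cons, List.foldl_nil]
      have hsc : pvScB c t i (k - i)
          = if pvGoodc c (pvSeg t i (k + 1)) then (k : Int) - (i : Int) + 1 else 0 := by
        simp only [pvScB]
        have he : i + (k - i) + 1 = k + 1 := by omega
        rw [he]
        split <;> omega
      rw [hsc]
      have hbal : (2 * ((pvSeg t i k).count c : Int) - ((pvSeg t i k).length : Int))
            + (if t[k] == c then 1 else -1)
          = 2 * ((pvSeg t i (k + 1)).count c : Int) - ((pvSeg t i (k + 1)).length : Int) := by
        rw [hcnt, hlen1, hlen0]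
        cases h : t[k] == c <;> simp <;> omega
      rw [hbal]
      have hcond : (0 < 2 * ((pvSeg t i (k + 1)).count c : Int) - ((pvSeg t i (k + 1)).length : Int))
          ↔ pvGoodc c (pvSeg t i (k + 1)) = true := by
        simp only [pvGoodc, decide_eq_true_eq]; omega
      simp only [Prod.mk.injEq]
      refine ⟨trivial, ?_⟩
      by_cases hg : pvGoodc c (pvSeg t i (k + 1)) = true
      · rw [if_pos (hcond.2 hg), if_pos hg]
      · rw [if_neg (fun hc => hg (hcond.1 hc)), if_neg hg]
        rw [max_eq_left (pv_nonneg_foldl _ _ h0)]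

-- a fold whose body is itself a running max over a row is the running max over the rows' flatMap
theorem pv_foldl_max_rows {α : Type} (l : List α) (row : α → List Int) (f : Int → α → Int)
    (hf : ∀ m0, 0 ≤ m0 → ∀ x ∈ l, f m0 x = (row x).foldl max m0) (m0 : Int) (h0 : 0 ≤ m0) :
    l.foldl f m0 = (l.flatMap row).foldl max m0 := by
  induction l generalizing m0 with
  | nil => simp
  | cons x l ih =>
      rw [List.foldl_cons, List.flatMap_cons, List.foldl_append,
        hf m0 h0 x (List.mem_cons_self), ih (fun a ha y hy => hf a ha y (List.mem_cons_of_mem x hy))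
          _ (pv_nonneg_foldl _ _ h0)]

theorem pv_A_eq (s : String) :
    max_high_density_length s = (pvSA s.toList).foldl max 0 := by
  unfold max_high_density_length
  simp only [PySem.List.len_eq, PySem.List.pyRange_zero_nat, List.foldl_map]
  rw [pv_foldl_max_rows (List.range s.toList.length)
      (fun i => pvRowA s.toList i s.toList.length) _ ?_ 0 le_rfl]
  · rfl
  · intro m0 h0 i hi
    have hi' : i ≤ s.toList.length := le_of_lt (List.mem_range.1 hi)
    have := pv_innerA s.toList i m0 h0 s.toList.length hi' le_rfl
    simp only at this ⊢
    rw [this]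

theorem pv_B_eq (s : String) :
    max_high_density_length_alt s = (pvSB s.toList).foldl max 0 := by
  unfold max_high_density_length_alt
  simp only [PySem.List.len_eq, PySem.List.pyRange_zero_nat, List.foldl_map]
  rw [pv_foldl_max_rows (PySem.Set.ofList s.toList)
      (fun c => (List.range s.toList.length).flatMap (fun i => pvRowB c s.toList i s.toList.length))
      _ ?_ 0 le_rfl]
  · rfl
  · intro m0 h0 c _
    rw [pv_foldl_max_rows (List.range s.toList.length)
        (fun i => pvRowB c s.toList i s.toList.length) _ ?_ m0 h0]
    intro m1 h1 i hi
    have hi' : i ≤ s.toList.length := le_of_lt (List.mem_range.1 hi)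
    have := pv_innerB s.toList c i m1 h1 s.toList.length hi' le_rfl
    simp only at this ⊢
    rw [this]

theorem pv_mem_SA {t : List Char} {x : Int} :
    x ∈ pvSA t ↔ ∃ i < t.length, ∃ d < t.length - i, x = pvScA t i d := by
  simp only [pvSA, pvRowA, List.mem_flatMap, List.mem_map, List.mem_range]
  constructor
  · rintro ⟨i, hi, d, hd, rfl⟩; exact ⟨i, hi, d, hd, rfl⟩
  · rintro ⟨i, hi, d, hd, rfl⟩; exact ⟨i, hi, d, hd, rfl⟩

theorem pv_mem_SB {t : List Char} {x : Int} :
    x ∈ pvSB t ↔ ∃ c ∈ PySem.Set.ofList t, ∃ i < t.length, ∃ d < t.length - i, x = pvScB c t i d := by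
  simp only [pvSB, pvRowB, List.mem_flatMap, List.mem_map, List.mem_range]
  constructor
  · rintro ⟨c, hc, i, hi, d, hd, rfl⟩; exact ⟨c, hc, i, hi, d, hd, rfl⟩
  · rintro ⟨c, hc, i, hi, d, hd, rfl⟩; exact ⟨c, hc, i, hi, d, hd, rfl⟩

theorem pv_SA_SB (t : List Char) : (pvSA t).foldl max 0 = (pvSB t).foldl max 0 := by
  apply le_antisymm
  · rw [pv_foldl_max_le_iff]
    refine ⟨(PySem.List.le_foldl_max _ _).1, ?_⟩
    intro x hx
    obtain ⟨i, hi, d, hd, rfl⟩ := pv_mem_SA.1 hx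
    by_cases hg : pvGood (pvSeg t i (i + d + 1)) = true
    · obtain ⟨c, hc, hgc⟩ := List.any_eq_true.1 hg
      have hmem : pvScB c t i d ∈ pvSB t :=
        pv_mem_SB.2 ⟨c, (PySem.Set.mem_ofList t c).2 (pv_mem_seg hc), i, hi, d, hd, rfl⟩
      have hval : pvScA t i d = pvScB c t i d := by
        simp only [pvScA, pvScB, if_pos hg, if_pos hgc]
      rw [hval]
      exact (PySem.List.le_foldl_max _ _).2 _ hmem
    · simp only [pvScA, if_neg hg]
      exact (PySem.List.le_foldl_max _ _).1
  · rw [pv_foldl_max_le_iff]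
    refine ⟨(PySem.List.le_foldl_max _ _).1, ?_⟩
    intro x hx
    obtain ⟨c, _, i, hi, d, hd, rfl⟩ := pv_mem_SB.1 hx
    by_cases hgc : pvGoodc c (pvSeg t i (i + d + 1)) = true
    · have hcmem : c ∈ pvSeg t i (i + d + 1) := by
        have hlt : ((pvSeg t i (i + d + 1)).length : Int)
            < 2 * ((pvSeg t i (i + d + 1)).count c : Int) := by simpa [pvGoodc] using hgc
        have hcnt : 0 < (pvSeg t i (i + d + 1)).count c := by omega
        exact List.count_pos_iff.1 hcnt
      have hg : pvGood (pvSeg t i (i + d + 1)) = true :=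
        List.any_eq_true.2 ⟨c, hcmem, hgc⟩
      have hmem : pvScA t i d ∈ pvSA t := pv_mem_SA.2 ⟨i, hi, d, hd, rfl⟩
      have hval : pvScB c t i d = pvScA t i d := by
        simp only [pvScA, pvScB, if_pos hg, if_pos hgc]
      rw [hval]
      exact (PySem.List.le_foldl_max _ _).2 _ hmem
    · simp only [pvScB, if_neg hgc]
      exact (PySem.List.le_foldl_max _ _).1

-- ===== VERDICT (by name: the statement is the Claim_ definition above) =====
theorem max_high_density_length_spec : Claim_equal_max_high_density_length := by
  intro s _
  unfold Spec_max_high_density_length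
  rw [pv_A_eq, pv_SA_SB, ← pv_B_eq]
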